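-- pv_equiv track=rewrite | github.com/liupengsay/PyIsTheBestLang | src/dp/tree_dp/question.py | lc_2673
-- ===== SOURCE A (Python) =====
-- from typing import List
--
-- def lc_2673(n: int, cost: List[int]) -> int:
--     # 模板：经典树形DP贪心
--     ans = 0
--     for i in range(n // 2, 0, -1):
--         left = cost[i * 2 - 1]
--         right = cost[i * 2]
--         if left > right:
--             cost[i - 1] += left
--             ans += left - right
--         else:
--             cost[i - 1] += right
--             ans += right - left
--     return ans
-- ===== SOURCE B (Python) =====
-- from typing import List
--
-- def lc_2673(n: int, cost: List[int]) -> int: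
--     # recursive post-order DFS over the heap-indexed tree (mutates cost like A)
--     m = n // 2
--     if m < 1:
--         return 0
--     ans = 0
--
--     def dfs(i: int) -> int:
--         nonlocal ans
--         if i > m:
--             return cost[i - 1]
--         l = dfs(2 * i)
--         r = dfs(2 * i + 1)
--         ans += abs(l - r)
--         cost[i - 1] += max(l, r)
--         return cost[i - 1]
--
--     dfs(1)
--     return ans
-- ===== Notes on version B (the rewrite author's own statement) =====
-- stated objective: alternative
-- what changed: Replaced the bottom-up descending index loop by a recursive post-order DFS over the heap-indexed tree that accumulates |left-right| through a closure variable.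
import Mathlib
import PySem

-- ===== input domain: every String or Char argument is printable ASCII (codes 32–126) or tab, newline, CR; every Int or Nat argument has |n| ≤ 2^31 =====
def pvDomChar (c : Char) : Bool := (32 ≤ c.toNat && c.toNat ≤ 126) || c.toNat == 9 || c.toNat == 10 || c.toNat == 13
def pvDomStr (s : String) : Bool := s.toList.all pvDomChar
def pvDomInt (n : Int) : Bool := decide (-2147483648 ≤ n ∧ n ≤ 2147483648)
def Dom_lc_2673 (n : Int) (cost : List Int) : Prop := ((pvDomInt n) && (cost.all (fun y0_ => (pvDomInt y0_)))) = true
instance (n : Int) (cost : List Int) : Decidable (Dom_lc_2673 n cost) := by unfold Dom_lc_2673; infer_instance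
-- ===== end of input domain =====

-- B replaces A's descending index loop by a recursive post-order DFS over the heap-indexed tree
-- (same cost, different decomposition); in Python both A and B mutate `cost` identically — the
-- theorems below are about the return value.

-- ===== PORT A =====
-- body of A's for-loop, at loop index i
def lc2673Step (s : List Int × Int) (i : Int) : List Int × Int :=
  let left := PySem.List.pyGetD s.1 (i * 2 - 1) 0
  let right := PySem.List.pyGetD s.1 (i * 2) 0
  if left > right then
    (PySem.List.pySetD s.1 (i - 1) (PySem.List.pyGetD s.1 (i - 1) 0 + left), s.2 + (left - right))
  else
    (PySem.List.pySetD s.1 (i - 1) (PySem.List.pyGetD s.1 (i - 1) 0 + right), s.2 + (right - left))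

def lc_2673 (n : Int) (cost : List Int) : Int :=
  ((PySem.List.pyRange (PySem.Int.floordiv n 2) 0 (-1)).foldl lc2673Step (cost, 0)).2

-- one step of A's loop, at index k+1, in closed form

-- ===== PORT B =====
-- dfs(i) from Source B; the returned triple is (return value of dfs, cost after mutation, ans).
-- `fuel` is only a totality guard for the recursion: the leaf test comes first, exactly as in Source B.
def lc2673Dfs (m : Int) (fuel : Nat) (i : Int) (cost : List Int) (ans : Int) :
    Int × List Int × Int :=
  if m < i then (PySem.List.pyGetD cost (i - 1) 0, cost, ans)
  else match fuel with
  | 0 => (0, cost, ans)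
  | fuel + 1 =>
    let p1 := lc2673Dfs m fuel (2 * i) cost ans
    let p2 := lc2673Dfs m fuel (2 * i + 1) p1.2.1 p1.2.2
    let ans3 := p2.2.2 + |p1.1 - p2.1|
    let v := PySem.List.pyGetD p2.2.1 (i - 1) 0 + max p1.1 p2.1
    (v, PySem.List.pySetD p2.2.1 (i - 1) v, ans3)

def lc_2673_alt (n : Int) (cost : List Int) : Int :=
  let m := PySem.Int.floordiv n 2
  if m < 1 then 0 else (lc2673Dfs m (m.toNat + 1) 1 cost 0).2.2

-- ===== PRECONDITION & SPEC =====
-- Pre_ excludes exactly the inputs on which A raises IndexError: n//2 ≥ 1 with len(cost) ≤ 2*(n//2).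
def Pre_lc_2673 (n : Int) (cost : List Int) : Prop :=
  PySem.Int.floordiv n 2 < 1 ∨ 2 * PySem.Int.floordiv n 2 < (cost.length : Int)
instance (n : Int) (cost : List Int) : Decidable (Pre_lc_2673 n cost) := by
  unfold Pre_lc_2673; infer_instance

def pvWitness_lc_2673 : Int × List Int := (3, [5, 4, 3])

def Spec_lc_2673 (n : Int) (cost : List Int) (out : Int) : Prop := out = lc_2673_alt n cost
instance (n : Int) (cost : List Int) (out : Int) : Decidable (Spec_lc_2673 n cost out) := by
  unfold Spec_lc_2673; infer_instance

-- ===== CLAIM (what is proved, stated in full; the proofs are below) =====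
def Claim_equal_lc_2673 : Prop :=
  ∀ (n : Int) (cost : List Int), Dom_lc_2673 n cost → Pre_lc_2673 n cost →
    Spec_lc_2673 n cost (lc_2673 n cost)

-- ===== LEMMAS AND PROOFS =====

def subB (i j : Nat) : Bool := (List.range (j + 1)).any (fun k => j / 2 ^ k == i)

theorem subB_iff (i j : Nat) : subB i j = true ↔ ∃ k, k ≤ j ∧ j / 2 ^ k = i := by
  simp [subB, List.any_eq_true, List.mem_range]

theorem subB_refl (i : Nat) : subB i i = true := by
  rw [subB_iff]; exact ⟨0, Nat.zero_le _, by simp⟩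

theorem subB_le {i j : Nat} (h : subB i j = true) : i ≤ j := by
  rw [subB_iff] at h; obtain ⟨k, _, hk⟩ := h; exact hk ▸ Nat.div_le_self _ _

theorem subB_zero (j : Nat) : subB 0 j = true := by
  rw [subB_iff]
  exact ⟨j, le_refl _, Nat.div_eq_of_lt (Nat.lt_two_pow_self)⟩

theorem subB_child_left {i j : Nat} (h : subB (2 * i) j = true) : subB i j = true := by
  rcases Nat.eq_zero_or_pos i with hi | hi
  · subst hi; exact subB_zero j
  rw [subB_iff] at h ⊢
  obtain ⟨k, hk, he⟩ := h
  have hp : (0:Nat) < 2 ^ k := Nat.two_pow_pos k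
  have h2 : 2 * 2 ^ k ≤ j := (Nat.le_div_iff_mul_le hp).1 (by omega)
  have hlt : k + 1 < 2 ^ (k + 1) := Nat.lt_two_pow_self
  refine ⟨k + 1, by rw [pow_succ] at hlt; omega, ?_⟩
  rw [pow_succ, ← Nat.div_div_eq_div_mul]; omega

theorem subB_child_right {i j : Nat} (h : subB (2 * i + 1) j = true) : subB i j = true := by
  rw [subB_iff] at h ⊢
  obtain ⟨k, hk, he⟩ := h
  have hp : (0:Nat) < 2 ^ k := Nat.two_pow_pos k
  have h2 : 1 * 2 ^ k ≤ j := (Nat.le_div_iff_mul_le hp).1 (by omega)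
  have hlt : k < 2 ^ k := Nat.lt_two_pow_self
  refine ⟨k + 1, by omega, ?_⟩
  rw [pow_succ, ← Nat.div_div_eq_div_mul]; omega

theorem subB_decomp {i j : Nat} (h : subB i j = true) :
    j = i ∨ subB (2 * i) j = true ∨ subB (2 * i + 1) j = true := by
  rw [subB_iff] at h
  obtain ⟨k, hk, he⟩ := h
  cases k with
  | zero => left; simpa using he
  | succ k =>
    right
    have hdd : j / 2 ^ k / 2 = i := by
      rw [Nat.div_div_eq_div_mul, ← pow_succ]; exact he
    have : j / 2 ^ k = 2 * i ∨ j / 2 ^ k = 2 * i + 1 := by omega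
    rcases this with h' | h'
    · exact Or.inl ((subB_iff _ _).2 ⟨k, by omega, h'⟩)
    · exact Or.inr ((subB_iff _ _).2 ⟨k, by omega, h'⟩)

theorem subB_not_left_self {i : Nat} (hi : 1 ≤ i) : subB (2 * i) i = false := by
  by_contra h
  have := subB_le (i := 2 * i) (j := i) (by simpa using h)
  omega

theorem subB_not_right_self {i : Nat} (hi : 1 ≤ i) : subB (2 * i + 1) i = false := by
  by_contra h
  have := subB_le (i := 2 * i + 1) (j := i) (by simpa using h)
  omega

theorem subB_disjoint {i j : Nat} (hi : 1 ≤ i) (h1 : subB (2 * i) j = true)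
    (h2 : subB (2 * i + 1) j = true) : False := by
  rw [subB_iff] at h1 h2
  obtain ⟨k, hk, hke⟩ := h1
  obtain ⟨l, hl, hle⟩ := h2
  rcases Nat.lt_trichotomy k l with hkl | hkl | hkl
  · have hex : k + (l - k) = l := by omega
    have hsplit : j / 2 ^ l = 2 * i / 2 ^ (l - k) := by
      rw [← hex, pow_add, ← Nat.div_div_eq_div_mul, hke]; congr 2; omega
    have hmono : 2 * i / 2 ^ (l - k) ≤ 2 * i / 2 := by
      apply Nat.div_le_div_left
      · calc (2:Nat) = 2 ^ 1 := by norm_num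
          _ ≤ 2 ^ (l - k) := Nat.pow_le_pow_right (by norm_num) (by omega)
      · norm_num
    omega
  · subst hkl; omega
  · have hex : l + (k - l) = k := by omega
    have hsplit : j / 2 ^ k = (2 * i + 1) / 2 ^ (k - l) := by
      rw [← hex, pow_add, ← Nat.div_div_eq_div_mul, hle]; congr 2; omega
    have hmono : (2 * i + 1) / 2 ^ (k - l) ≤ (2 * i + 1) / 2 := by
      apply Nat.div_le_div_left
      · calc (2:Nat) = 2 ^ 1 := by norm_num
          _ ≤ 2 ^ (k - l) := Nat.pow_le_pow_right (by norm_num) (by omega)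
      · norm_num
    omega

theorem subB_one : ∀ j : Nat, 1 ≤ j → subB 1 j = true := by
  intro j
  induction j using Nat.strong_induction_on with
  | _ j ih =>
    intro hj
    rcases Nat.lt_or_ge j 2 with h2 | h2
    · have : j = 1 := by omega
      subst this; exact subB_refl 1
    · have := ih (j / 2) (by omega) (by omega)
      rw [subB_iff] at this ⊢
      obtain ⟨k, hk, he⟩ := this
      refine ⟨k + 1, by omega, ?_⟩
      rw [pow_succ, mul_comm, ← Nat.div_div_eq_div_mul]; exact he

def valS (m : Nat) (c : List Int) (i : Nat) : Int :=
  if h : i = 0 ∨ m < i then c.getD (i - 1) 0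
  else max (valS m c (2 * i)) (valS m c (2 * i + 1)) + c.getD (i - 1) 0
termination_by m + 1 - i
decreasing_by all_goals (simp only [not_or] at h; omega)

def ansS (m : Nat) (c : List Int) (i : Nat) : Int :=
  if h : i = 0 ∨ m < i then 0
  else ansS m c (2 * i) + ansS m c (2 * i + 1) + |valS m c (2 * i) - valS m c (2 * i + 1)|
termination_by m + 1 - i
decreasing_by all_goals (simp only [not_or] at h; omega)

theorem valS_leaf (m : Nat) (c : List Int) (i : Nat) (h : i = 0 ∨ m < i) :
    valS m c i = c.getD (i - 1) 0 := by rw [valS, dif_pos h]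

theorem valS_node (m : Nat) (c : List Int) (i : Nat) (h1 : 1 ≤ i) (h2 : i ≤ m) :
    valS m c i = max (valS m c (2 * i)) (valS m c (2 * i + 1)) + c.getD (i - 1) 0 := by
  rw [valS, dif_neg (by omega)]

theorem ansS_leaf (m : Nat) (c : List Int) (i : Nat) (h : i = 0 ∨ m < i) :
    ansS m c i = 0 := by rw [ansS, dif_pos h]

theorem ansS_node (m : Nat) (c : List Int) (i : Nat) (h1 : 1 ≤ i) (h2 : i ≤ m) :
    ansS m c i = ansS m c (2 * i) + ansS m c (2 * i + 1)
      + |valS m c (2 * i) - valS m c (2 * i + 1)| := by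
  rw [ansS, dif_neg (by omega)]

theorem valS_congr_aux (m : Nat) (c1 c2 : List Int) :
    ∀ (fuelN : Nat) (i : Nat), m + 1 - i ≤ fuelN → 1 ≤ i →
    (∀ j, 1 ≤ j → subB i j = true → c1.getD (j - 1) 0 = c2.getD (j - 1) 0) →
    valS m c1 i = valS m c2 i ∧ ansS m c1 i = ansS m c2 i := by
  intro fuelN
  induction fuelN with
  | zero =>
    intro i hf hi h
    have hm : m < i := by omega
    rw [valS_leaf _ _ _ (Or.inr hm), valS_leaf _ _ _ (Or.inr hm),
        ansS_leaf _ _ _ (Or.inr hm), ansS_leaf _ _ _ (Or.inr hm)]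
    exact ⟨h i hi (subB_refl i), rfl⟩
  | succ fuelN ih =>
    intro i hf hi h
    by_cases hm : m < i
    · rw [valS_leaf _ _ _ (Or.inr hm), valS_leaf _ _ _ (Or.inr hm),
          ansS_leaf _ _ _ (Or.inr hm), ansS_leaf _ _ _ (Or.inr hm)]
      exact ⟨h i hi (subB_refl i), rfl⟩
    · have him : i ≤ m := by omega
      have hl := ih (2 * i) (by omega) (by omega)
        (fun j hj hs => h j hj (subB_child_left hs))
      have hr := ih (2 * i + 1) (by omega) (by omega)
        (fun j hj hs => h j hj (subB_child_right hs))
      rw [valS_node _ _ _ hi him, valS_node _ _ _ hi him,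
          ansS_node _ _ _ hi him, ansS_node _ _ _ hi him,
          hl.1, hr.1, hl.2, hr.2, h i hi (subB_refl i)]
      exact ⟨rfl, rfl⟩

theorem pyGetD_nat_sub_one (c : List Int) (i : Nat) (hi : 1 ≤ i) :
    PySem.List.pyGetD c ((i : Int) - 1) 0 = c.getD (i - 1) 0 := by
  have h : ((i : Int) - 1) = ((i - 1 : Nat) : Int) := by omega
  rw [h, PySem.List.pyGetD_natCast]

theorem pySetD_nat_sub_one (c : List Int) (i : Nat) (hi : 1 ≤ i) (v : Int) :
    PySem.List.pySetD c ((i : Int) - 1) v = c.set (i - 1) v := by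
  have h : ((i : Int) - 1) = ((i - 1 : Nat) : Int) := by omega
  rw [h, PySem.List.pySetD_natCast]

theorem dfs_spec (m : Nat) : ∀ (fuel i : Nat) (c : List Int) (ans : Int),
    1 ≤ i → m < i * 2 ^ fuel → 2 * m < c.length →
    (lc2673Dfs (m : Int) fuel (i : Int) c ans).1 = valS m c i ∧
    (lc2673Dfs (m : Int) fuel (i : Int) c ans).2.2 = ans + ansS m c i ∧
    (lc2673Dfs (m : Int) fuel (i : Int) c ans).2.1.length = c.length ∧
    (∀ j, 1 ≤ j → subB i j = false →
      (lc2673Dfs (m : Int) fuel (i : Int) c ans).2.1.getD (j - 1) 0 = c.getD (j - 1) 0) := by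
  intro fuel
  induction fuel with
  | zero =>
    intro i c ans hi hfuel hlen
    have hm : m < i := by simpa using hfuel
    rw [lc2673Dfs, if_pos (by exact_mod_cast hm)]
    refine ⟨?_, by simp [ansS_leaf _ _ _ (Or.inr hm)], rfl, fun j hj hs => rfl⟩
    rw [pyGetD_nat_sub_one c i hi, valS_leaf _ _ _ (Or.inr hm)]
  | succ fuel ih =>
    intro i c ans hi hfuel hlen
    by_cases hm : m < i
    · rw [lc2673Dfs, if_pos (by exact_mod_cast hm)]
      refine ⟨?_, by simp [ansS_leaf _ _ _ (Or.inr hm)], rfl, fun j hj hs => rfl⟩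
      rw [pyGetD_nat_sub_one c i hi, valS_leaf _ _ _ (Or.inr hm)]
    · have him : i ≤ m := by omega
      rw [lc2673Dfs, if_neg (by exact_mod_cast hm)]
      have hcl : (2 * (i : Int)) = ((2 * i : Nat) : Int) := by push_cast; ring
      have hcr : (2 * (i : Int) + 1) = ((2 * i + 1 : Nat) : Int) := by push_cast; ring
      have hpe : i * 2 ^ (fuel + 1) = 2 * i * 2 ^ fuel := by rw [pow_succ]; ring
      have hpe2 : (2 * i + 1) * 2 ^ fuel = 2 * i * 2 ^ fuel + 2 ^ fuel := by ring
      have hpos : 0 < 2 ^ fuel := Nat.two_pow_pos fuel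
      have h1 := ih (2 * i) c ans (by omega) (by omega) hlen
      rw [hcr, hcl]
      set p1 := lc2673Dfs (m : Int) fuel ((2 * i : Nat) : Int) c ans with hp1
      have h2 := ih (2 * i + 1) p1.2.1 p1.2.2 (by omega)
        (by omega)
        (by rw [h1.2.2.1]; exact hlen)
      set p2 := lc2673Dfs (m : Int) fuel ((2 * i + 1 : Nat) : Int) p1.2.1 p1.2.2 with hp2
      -- c1 agrees with c on the subtree of 2i+1 (and everywhere off subtree 2i)
      have hagree : ∀ j, 1 ≤ j → subB (2 * i + 1) j = true →
          p1.2.1.getD (j - 1) 0 = c.getD (j - 1) 0 := by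
        intro j hj hs
        apply h1.2.2.2 j hj
        by_contra hc
        exact subB_disjoint hi (by simpa using hc) hs
      have hvr : valS m p1.2.1 (2 * i + 1) = valS m c (2 * i + 1) :=
        (valS_congr_aux m p1.2.1 c (m + 1) (2 * i + 1) (by omega) (by omega)
          (fun j hj hs => hagree j hj hs)).1
      have har : ansS m p1.2.1 (2 * i + 1) = ansS m c (2 * i + 1) :=
        (valS_congr_aux m p1.2.1 c (m + 1) (2 * i + 1) (by omega) (by omega)
          (fun j hj hs => hagree j hj hs)).2
      -- reading c2 at i-1 gives the original entry
      have hread : p2.2.1.getD (i - 1) 0 = c.getD (i - 1) 0 := by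
        rw [h2.2.2.2 i hi (subB_not_right_self hi), h1.2.2.2 i hi (subB_not_left_self hi)]
      have hvv : PySem.List.pyGetD p2.2.1 ((i : Int) - 1) 0 + max p1.1 p2.1 = valS m c i := by
        rw [pyGetD_nat_sub_one _ i hi, hread, h1.1, h2.1, hvr, valS_node _ _ _ hi him]
        ring
      refine ⟨hvv, ?_, ?_, ?_⟩
      · show p2.2.2 + |p1.1 - p2.1| = ans + ansS m c i
        rw [h2.2.1, h1.2.1, h1.1, h2.1, hvr, har, ansS_node _ _ _ hi him]
        ring
      · show (PySem.List.pySetD p2.2.1 ((i:Int) - 1) _).length = c.length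
        rw [pySetD_nat_sub_one _ i hi, List.length_set, h2.2.2.1, h1.2.2.1]
      · intro j hj hs
        show (PySem.List.pySetD p2.2.1 ((i:Int) - 1) _).getD (j - 1) 0 = c.getD (j - 1) 0
        have hji : j ≠ i := fun he => by rw [he] at hs; simp [subB_refl] at hs
        have hsl : subB (2 * i) j = false := by
          by_contra hc
          rw [subB_child_left (by simpa using hc)] at hs; exact absurd hs (by simp)
        have hsr : subB (2 * i + 1) j = false := by
          by_contra hc
          rw [subB_child_right (by simpa using hc)] at hs; exact absurd hs (by simp)
        rw [pySetD_nat_sub_one _ i hi]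
        have hne : j - 1 ≠ i - 1 := by omega
        rw [show ((p2.2.1.set (i-1) _).getD (j-1) 0 = p2.2.1.getD (j-1) 0) from by
          simp [List.getD, List.getElem?_set_ne (Ne.symm hne)]]
        rw [h2.2.2.2 j hj hsr, h1.2.2.2 j hj hsl]

def dJ (m : Nat) (c : List Int) (i : Nat) : Int :=
  |valS m c (2 * i) - valS m c (2 * i + 1)|

theorem ansS_eq_sum (m : Nat) (c : List Int) : ∀ (fuelN i : Nat), m + 1 - i ≤ fuelN → 1 ≤ i →
    ansS m c i = ∑ j ∈ Finset.range m, (if subB i (j + 1) = true then dJ m c (j + 1) else 0) := by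
  intro fuelN
  induction fuelN with
  | zero =>
    intro i hf hi
    have hm : m < i := by omega
    rw [ansS_leaf _ _ _ (Or.inr hm)]
    refine (Finset.sum_eq_zero ?_).symm
    intro j hj
    rw [if_neg]
    intro hs
    have := subB_le hs
    have := Finset.mem_range.1 hj
    omega
  | succ fuelN ih =>
    intro i hf hi
    by_cases hm : m < i
    · rw [ansS_leaf _ _ _ (Or.inr hm)]
      refine (Finset.sum_eq_zero ?_).symm
      intro j hj
      rw [if_neg]
      intro hs
      have := subB_le hs
      have := Finset.mem_range.1 hj
      omega
    · have him : i ≤ m := by omega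
      rw [ansS_node _ _ _ hi him, ih (2 * i) (by omega) (by omega),
          ih (2 * i + 1) (by omega) (by omega)]
      have hsplit : ∀ j ∈ Finset.range m,
          (if subB i (j + 1) = true then dJ m c (j + 1) else 0)
          = ((if subB (2 * i) (j + 1) = true then dJ m c (j + 1) else 0)
            + (if subB (2 * i + 1) (j + 1) = true then dJ m c (j + 1) else 0))
            + (if j = i - 1 then dJ m c (j + 1) else 0) := by
        intro j _
        by_cases hji : j = i - 1
        · have hj1 : j + 1 = i := by omega
          rw [if_pos hji, hj1, if_pos (subB_refl i),
              if_neg (by rw [subB_not_left_self hi]; simp),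
              if_neg (by rw [subB_not_right_self hi]; simp)]
          ring
        · have hj1 : j + 1 ≠ i := by omega
          rw [if_neg hji]
          by_cases hs : subB i (j + 1) = true
          · rcases subB_decomp hs with he | hl | hr
            · omega
            · rw [if_pos hs, if_pos hl, if_neg (by
                intro hr
                exact subB_disjoint hi hl hr)]
              ring
            · rw [if_pos hs, if_pos hr, if_neg (by
                intro hl
                exact subB_disjoint hi hl hr)]
              ring
          · rw [if_neg hs,
               if_neg (fun hc => hs (subB_child_left hc)),
               if_neg (fun hc => hs (subB_child_right hc))]
            ring
      rw [Finset.sum_congr rfl hsplit, Finset.sum_add_distrib, Finset.sum_add_distrib]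
      have hlast : ∑ j ∈ Finset.range m, (if j = i - 1 then dJ m c (j + 1) else 0)
          = dJ m c i := by
        rw [Finset.sum_ite_eq' (Finset.range m) (i - 1) (fun j => dJ m c (j + 1)),
            if_pos (Finset.mem_range.2 (by omega))]
        congr 1
        omega
      rw [hlast]
      unfold dJ
      ring

theorem ansS_one (m : Nat) (c : List Int) (hm : 1 ≤ m) :
    ansS m c 1 = ∑ j ∈ Finset.range m, dJ m c (j + 1) := by
  rw [ansS_eq_sum m c (m + 1) 1 (by omega) (by omega)]
  exact Finset.sum_congr rfl fun j _ => if_pos (subB_one (j + 1) (by omega))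

theorem step_eval (c : List Int) (a : Int) (k : Nat) :
    lc2673Step (c, a) ((k + 1 : Nat) : Int)
      = (c.set k (c.getD k 0 + max (c.getD (2 * k + 1) 0) (c.getD (2 * k + 2) 0)),
         a + |c.getD (2 * k + 1) 0 - c.getD (2 * k + 2) 0|) := by
  unfold lc2673Step
  have e1 : (((k + 1 : Nat) : Int) * 2 - 1) = ((2 * k + 1 : Nat) : Int) := by push_cast; ring
  have e2 : (((k + 1 : Nat) : Int) * 2) = ((2 * k + 2 : Nat) : Int) := by push_cast; ring
  have e3 : (((k + 1 : Nat) : Int) - 1) = ((k : Nat) : Int) := by push_cast; ring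
  rw [e1, e2, e3]
  simp only [PySem.List.pyGetD_natCast, PySem.List.pySetD_natCast]
  by_cases h : c.getD (2 * k + 1) 0 > c.getD (2 * k + 2) 0
  · rw [if_pos h, max_eq_left (le_of_lt h),
        abs_of_nonneg (by omega : (0:Int) ≤ c.getD (2 * k + 1) 0 - c.getD (2 * k + 2) 0)]
  · rw [if_neg h, max_eq_right (not_lt.1 h), abs_sub_comm,
        abs_of_nonneg (by omega : (0:Int) ≤ c.getD (2 * k + 2) 0 - c.getD (2 * k + 1) 0)]

theorem loopA (m : Nat) (c0 : List Int) (hlen0 : 2 * m < c0.length) :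
    ∀ (k : Nat) (c : List Int) (a : Int), k ≤ m → c.length = c0.length →
    (∀ j, 1 ≤ j → j ≤ k → c.getD (j - 1) 0 = c0.getD (j - 1) 0) →
    (∀ j, k < j → c.getD (j - 1) 0 = valS m c0 j) →
    ((PySem.List.pyRange (k : Int) 0 (-1)).foldl lc2673Step (c, a)).2
      = a + ∑ j ∈ Finset.range k, dJ m c0 (j + 1) := by
  intro k
  induction k with
  | zero =>
    intro c a _ _ _ _
    rw [show ((0 : Nat) : Int) = (0 : Int) from rfl,
        PySem.List.pyRange_neg_one_eq_nil (by norm_num)]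
    simp
  | succ k ih =>
    intro c a hk hlen hlow hhigh
    rw [PySem.List.pyRange_neg_one_cons (by exact_mod_cast Nat.succ_pos k)]
    rw [show (((k + 1 : Nat) : Int) - 1) = ((k : Nat) : Int) by push_cast; ring]
    rw [List.foldl_cons, step_eval]
    have hL : c.getD (2 * k + 1) 0 = valS m c0 (2 * k + 2) := by
      have := hhigh (2 * k + 2) (by omega); simpa using this
    have hR : c.getD (2 * k + 2) 0 = valS m c0 (2 * k + 3) := by
      have := hhigh (2 * k + 3) (by omega); simpa using this
    have hc0 : c.getD k 0 = c0.getD k 0 := by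
      have := hlow (k + 1) (by omega) (by omega); simpa using this
    set c' := c.set k (c.getD k 0 + max (c.getD (2 * k + 1) 0) (c.getD (2 * k + 2) 0)) with hc'
    have hklen : k < c.length := by omega
    rw [ih c' (a + |c.getD (2 * k + 1) 0 - c.getD (2 * k + 2) 0|) (by omega)
      (by rw [hc', List.length_set]; exact hlen)
      (by
        intro j hj hjk
        have hne : j - 1 ≠ k := by omega
        rw [hc', show ((c.set k _).getD (j-1) 0 = c.getD (j-1) 0) from by
          simp [List.getD, List.getElem?_set_ne (Ne.symm hne)]]
        exact hlow j hj (by omega))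
      (by
        intro j hjk
        by_cases hje : j = k + 1
        · subst hje
          rw [show k + 1 - 1 = k from rfl]
          rw [hc', show ((c.set k _).getD k 0
              = c.getD k 0 + max (c.getD (2*k+1) 0) (c.getD (2*k+2) 0)) from by
            simp [List.getD, hklen]]
          rw [hc0, hL, hR, valS_node m c0 (k + 1) (by omega) (by omega)]
          rw [show 2 * (k + 1) = 2 * k + 2 from by ring]
          rw [show 2 * k + 2 + 1 = 2 * k + 3 from rfl]
          rw [show k + 1 - 1 = k from rfl]
          ring
        · have hne : j - 1 ≠ k := by omega
          rw [hc', show ((c.set k _).getD (j-1) 0 = c.getD (j-1) 0) from by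
            simp [List.getD, List.getElem?_set_ne (Ne.symm hne)]]
          exact hhigh j (by omega))]
    rw [Finset.sum_range_succ]
    unfold dJ
    rw [hL, hR]
    rw [show 2 * (k + 1) = 2 * k + 2 from by ring]
    rw [show 2 * k + 2 + 1 = 2 * k + 3 from rfl]
    ring

theorem final_eq : ∀ (n : Int) (cost : List Int), Pre_lc_2673 n cost →
    lc_2673 n cost = lc_2673_alt n cost := by
  intro n cost hpre
  unfold lc_2673 lc_2673_alt
  by_cases hm : PySem.Int.floordiv n 2 < 1
  · rw [if_pos hm, PySem.List.pyRange_neg_one_eq_nil (by omega)]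
    rfl
  · rw [if_neg hm]
    have hlen : 2 * PySem.Int.floordiv n 2 < (cost.length : Int) := by
      rcases hpre with h | h
      · omega
      · exact h
    set mi := PySem.Int.floordiv n 2 with hmi
    set mN := mi.toNat with hmN
    have hmc : mi = (mN : Int) := by omega
    have hm1 : 1 ≤ mN := by omega
    have hlenN : 2 * mN < cost.length := by omega
    rw [hmc]
    -- A side
    have hA := loopA mN cost hlenN mN cost 0 (le_refl _) rfl
      (fun j _ _ => rfl)
      (fun j hj => by rw [valS_leaf mN cost j (Or.inr hj)])
    rw [hA]
    -- B side
    have hfuel : mN < 1 * 2 ^ (mN + 1) :=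
      lt_of_lt_of_le Nat.lt_two_pow_self
        (by rw [one_mul]; exact Nat.pow_le_pow_right (by norm_num) (by omega))
    have hB := (dfs_spec mN (mN + 1) 1 cost 0 (le_refl _) hfuel hlenN).2.1
    norm_num at hB
    rw [hB, ansS_one mN cost hm1]
    ring

-- ===== VERDICT (by name: the statement is the Claim_ definition above) =====
theorem lc_2673_spec : Claim_equal_lc_2673 := by
  intro n cost _ hpre
  unfold Spec_lc_2673
  exact final_eq n cost hpre
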